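-- pv_equiv track=rewrite | github.com/olincollege/pop-sadness-analysis | extract_data.py | format_for_genius
-- ===== SOURCE A (Python) =====
-- genius_characters = (
--     "abcdefghijklmnopqrstuvwxyzABCDEFGHIJKLMNOPQRSTUVWXYZ0123456789- "
-- )
--
-- def format_for_genius(string):
--     formatted_string = ""
--     for character in string:
--         if character in genius_characters:
--             formatted_string += character
--         elif character == "&":
--             formatted_string += "and"
--     return formatted_string
-- ===== SOURCE B (Python) =====
-- import re
--
-- def format_for_genius(string):
--     # '&' is not an allowed character and "and" passes the filter unchanged,
--     # so replacing first then deleting the complement class is equivalent.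
--     return re.sub(r"[^A-Za-z0-9 -]", "", string.replace("&", "and"))
-- ===== Notes on version B (the rewrite author's own statement) =====
-- stated objective: idiomatic
-- what changed: Replaces the explicit per-character accumulation loop with str.replace('&','and') followed by a single regex complement-class deletion re.sub(r'[^A-Za-z0-9 -]', '', s); no accumulator is maintained.
import Mathlib
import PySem

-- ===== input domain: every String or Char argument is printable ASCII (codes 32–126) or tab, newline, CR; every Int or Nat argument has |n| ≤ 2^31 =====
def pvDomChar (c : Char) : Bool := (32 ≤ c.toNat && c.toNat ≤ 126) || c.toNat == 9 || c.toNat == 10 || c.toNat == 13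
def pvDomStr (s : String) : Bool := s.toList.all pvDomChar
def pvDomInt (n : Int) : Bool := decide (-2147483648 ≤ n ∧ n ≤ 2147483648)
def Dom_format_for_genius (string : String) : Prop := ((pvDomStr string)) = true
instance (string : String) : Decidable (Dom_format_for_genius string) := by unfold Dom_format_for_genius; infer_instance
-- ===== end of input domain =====

-- B replaces A's per-character accumulation loop by str.replace('&','and') followed by a
-- regex complement-class deletion (ported here as a filter over the character class); same value, no speed claim.

-- ===== PORT A =====
-- genius_characters (module constant)
def geniusChars : List Char := "abcdefghijklmnopqrstuvwxyzABCDEFGHIJKLMNOPQRSTUVWXYZ0123456789- ".toList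

-- 'character in genius_characters' tests a length-1 substring, which is exactly character membership.
def format_for_genius (string : String) : String :=
  String.ofList (string.toList.foldl (fun acc c =>
    if geniusChars.contains c then acc ++ [c]
    else if c = '&' then acc ++ ['a', 'n', 'd']
    else acc) [])

-- ===== PORT B =====
-- the regex character class [A-Za-z0-9 -], transcribed as code-point ranges; re.sub deleting
-- its complement is exactly a filter keeping the class
def regexAllowed (c : Char) : Bool :=
  (65 ≤ c.toNat && c.toNat ≤ 90) || (97 ≤ c.toNat && c.toNat ≤ 122) ||
  (48 ≤ c.toNat && c.toNat ≤ 57) || c.toNat == 32 || c.toNat == 45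

def format_for_genius_alt (string : String) : String :=
  String.ofList ((PySem.Chars.replace string.toList ['&'] ['a', 'n', 'd']).filter regexAllowed)

-- ===== PRECONDITION & SPEC =====
def Spec_format_for_genius (string : String) (out : String) : Prop := out = format_for_genius_alt string
instance (string : String) (out : String) : Decidable (Spec_format_for_genius string out) := by unfold Spec_format_for_genius; infer_instance

-- ===== CLAIM (what is proved, stated in full; the proofs are below) =====
def Claim_equal_format_for_genius : Prop := ∀ (string : String), Dom_format_for_genius string → Spec_format_for_genius string (format_for_genius string)

-- ===== LEMMAS AND PROOFS =====

theorem char_toNat_inj (c d : Char) (h : c.toNat = d.toNat) : c = d := by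
  apply Char.ext; apply UInt32.toNat_inj.mp; exact h

theorem char_beq_toNat (c d : Char) : (c == d) = (c.toNat == d.toNat) := by
  by_cases h : c = d
  · subst h; simp
  · have : c.toNat ≠ d.toNat := fun hn => h (char_toNat_inj c d hn)
    simp [h, this]

-- A's membership test equals B's regex character class, character by character
set_option maxRecDepth 4000 in
theorem contains_eq_regex (c : Char) : geniusChars.contains c = regexAllowed c := by
  have h : geniusChars = ['a','b','c','d','e','f','g','h','i','j','k','l','m','n','o','p','q','r','s','t','u','v','w','x','y','z','A','B','C','D','E','F','G','H','I','J','K','L','M','N','O','P','Q','R','S','T','U','V','W','X','Y','Z','0','1','2','3','4','5','6','7','8','9','-',' '] := by decide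
  rw [h]
  apply Bool.eq_iff_iff.mpr
  simp only [List.contains_cons, List.contains_nil, Bool.or_false, char_beq_toNat, regexAllowed,
    Bool.or_eq_true, Bool.and_eq_true, beq_iff_eq, decide_eq_true_eq]
  simp only [show ('a'.toNat = 97) from rfl, show ('b'.toNat = 98) from rfl, show ('c'.toNat = 99) from rfl, show ('d'.toNat = 100) from rfl, show ('e'.toNat = 101) from rfl, show ('f'.toNat = 102) from rfl, show ('g'.toNat = 103) from rfl, show ('h'.toNat = 104) from rfl, show ('i'.toNat = 105) from rfl, show ('j'.toNat = 106) from rfl, show ('k'.toNat = 107) from rfl, show ('l'.toNat = 108) from rfl, show ('m'.toNat = 109) from rfl, show ('n'.toNat = 110) from rfl, show ('o'.toNat = 111) from rfl, show ('p'.toNat = 112) from rfl, show ('q'.toNat = 113) from rfl, show ('r'.toNat = 114) from rfl, show ('s'.toNat = 115) from rfl, show ('t'.toNat = 116) from rfl, show ('u'.toNat = 117) from rfl, show ('v'.toNat = 118) from rfl, show ('w'.toNat = 119) from rfl, show ('x'.toNat = 120) from rfl, show ('y'.toNat = 121) from rfl, show ('z'.toNat = 122) from rfl, show ('A'.toNat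 = 65) from rfl, show ('B'.toNat = 66) from rfl, show ('C'.toNat = 67) from rfl, show ('D'.toNat = 68) from rfl, show ('E'.toNat = 69) from rfl, show ('F'.toNat = 70) from rfl, show ('G'.toNat = 71) from rfl, show ('H'.toNat = 72) from rfl, show ('I'.toNat = 73) from rfl, show ('J'.toNat = 74) from rfl, show ('K'.toNat = 75) from rfl, show ('L'.toNat = 76) from rfl, show ('M'.toNat = 77) from rfl, show ('N'.toNat = 78) from rfl, show ('O'.toNat = 79) from rfl, show ('P'.toNat = 80) from rfl, show ('Q'.toNat = 81) from rfl, show ('R'.toNat = 82) from rfl, show ('S'.toNat = 83) from rfl, show ('T'.toNat = 84) from rfl, show ('U'.toNat = 85) from rfl, show ('V'.toNat = 86) from rfl, show ('W'.toNat = 87) from rfl, show ('X'.toNat = 88) from rfl, show ('Y'.toNat = 89) from rfl, show ('Z'.toNat = 90) from rfl, show ('0'.toNat = 48) from rfl, show ('1'.toNat = 49) from rfl, show ('2'.toNat = 50) from rfl, show ('3'.toNat = 51) from rfl, show ('4'.toNat = 52) from rfl, show ('5'.toNat = 53) from rfl, show ('6'.toNat = 54) from rfl, show ('7'.toNat = 55)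 from rfl, show ('8'.toNat = 56) from rfl, show ('9'.toNat = 57) from rfl, show ('-'.toNat = 45) from rfl, show (' '.toNat = 32) from rfl]
  omega

-- single-character replacement expands each character independently
def ampExp (c : Char) : List Char := if c = '&' then ['a','n','d'] else [c]

theorem replace_go_amp (l : List Char) : ∀ (fuel : Nat) (acc : List Char), l.length ≤ fuel →
    PySem.Chars.replace.go ['&'] ['a','n','d'] fuel l acc = acc.reverse ++ l.flatMap ampExp := by
  induction l with
  | nil => intro fuel acc _; cases fuel <;> simp [PySem.Chars.replace.go]
  | cons c t ih =>
    intro fuel acc hf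
    cases fuel with
    | zero => simp at hf
    | succ f =>
      by_cases hc : c = '&'
      · subst hc
        rw [PySem.Chars.replace.go]
        simp only [List.isPrefixOf, beq_self_eq_true, Bool.true_and, if_pos,
          List.drop_succ_cons, List.drop_zero, List.length_cons, List.length_nil]
        rw [ih f _ (by simpa using hf)]
        simp [ampExp]
      · rw [PySem.Chars.replace.go]
        have : (['&'].isPrefixOf (c :: t)) = false := by
          simp [List.isPrefixOf, Ne.symm hc]
        rw [this]
        simp only [Bool.false_eq_true, if_false]
        rw [ih f _ (by simpa using hf)]
        simp [ampExp, hc]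

theorem replace_amp (l : List Char) :
    PySem.Chars.replace l ['&'] ['a','n','d'] = l.flatMap ampExp := by
  rw [PySem.Chars.replace]
  simp only [List.isEmpty, Bool.false_eq_true, if_false]
  exact (replace_go_amp l l.length [] le_rfl).trans (by simp)

-- A's accumulation loop equals the filter of the expanded list
theorem foldl_eq_filter (l : List Char) : ∀ acc : List Char,
    l.foldl (fun acc c =>
      if geniusChars.contains c then acc ++ [c]
      else if c = '&' then acc ++ ['a', 'n', 'd']
      else acc) acc = acc ++ (l.flatMap ampExp).filter regexAllowed := by
  induction l with
  | nil => intro acc; simp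
  | cons c t ih =>
    intro acc
    simp only [List.foldl_cons, List.flatMap_cons, List.filter_append, ← List.append_assoc]
    rw [ih]
    congr 1
    rw [contains_eq_regex]
    by_cases hr : regexAllowed c = true
    · have hc : c ≠ '&' := by intro h; subst h; simp [regexAllowed] at hr
      simp [hr, ampExp, hc]
    · simp only [hr, Bool.false_eq_true, if_false]
      by_cases hc : c = '&'
      · subst hc; simp [ampExp]; decide
      · simp [hc, ampExp, hr]

-- ===== VERDICT (by name: the statement is the Claim_ definition above) =====
theorem format_for_genius_spec : Claim_equal_format_for_genius := by
  intro s _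
  unfold Spec_format_for_genius format_for_genius format_for_genius_alt
  rw [replace_amp, foldl_eq_filter]
  simp
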